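-- pv_equiv track=rewrite | github.com/leetakhotsamit/CS2020 | CS2020/a06/a06q1.py | new_word
-- ===== SOURCE A (Python) =====
-- def new_word(s):
--     '''
--     Returns new string where each instance of s[2], not including s[2] itself,
--     is changed with a '#' symbol
--
--     new_word: Str -> Str
--
--     Examples:
--
--     '''
--     if len(s) < 3:
--         return s
--     else:
--         third_letter = s[2]
--         word_lst = []
--     for letter in s:
--         if letter == third_letter:
--             letter = '#'
--         word_lst.append(letter)
--         new_string = ''.join(word_lst)
--         keep_third = new_string[0:2] + third_letter + new_string[3:]
--     return keep_third
-- ===== SOURCE B (Python) =====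
-- def new_word(s):
--     if len(s) < 3:
--         return s
--     c = s[2]
--     parts = s.split(c)
--     k = len(s[:2].split(c))  # number of segments before the kept occurrence at index 2
--     return '#'.join(parts[:k]) + c + '#'.join(parts[k:])
-- ===== Notes on version B (the rewrite author's own statement) =====
-- stated objective: faster
-- what changed: A scans every character, replaces each occurrence of the third character, and rebuilds the joined string and the patched result inside the loop before slicing position 2 back in; B instead splits the string into the segments between occurrences of the third character, rejoins them once with the replacement separator, and restores the one separator corresponding to index 2, located by counting segments in the two-character prefix.
import Mathlib
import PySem

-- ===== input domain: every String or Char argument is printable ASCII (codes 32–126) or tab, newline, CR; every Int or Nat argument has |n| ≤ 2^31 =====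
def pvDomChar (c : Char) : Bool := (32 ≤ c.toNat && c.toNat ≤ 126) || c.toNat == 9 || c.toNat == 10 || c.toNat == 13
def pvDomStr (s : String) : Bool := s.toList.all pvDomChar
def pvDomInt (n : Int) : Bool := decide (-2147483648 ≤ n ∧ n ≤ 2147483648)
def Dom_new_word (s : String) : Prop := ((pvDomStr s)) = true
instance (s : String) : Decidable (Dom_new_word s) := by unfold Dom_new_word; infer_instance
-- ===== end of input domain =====

-- B splits the string into segments between occurrences of s[2], rejoins with '#',
-- and restores the separator at index 2 (an alternative segment-based algorithm).

-- ===== PORT A =====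
def new_word (s : String) : String :=
  let l := s.toList
  if l.length < 3 then s
  else
    let third := PySem.List.pyGetD l 2 ' '
    let word_lst := l.foldl (fun acc letter =>
      acc ++ [if letter == third then '#' else letter]) []
    let new_string := word_lst
    let keep_third := PySem.List.slice new_string (some 0) (some 2) ++ [third] ++
      PySem.List.slice new_string (some 3) none
    String.ofList keep_third

-- ===== PORT B =====
def new_word_alt (s : String) : String :=
  let l := s.toList
  if l.length < 3 then s
  else
    let c := PySem.List.pyGetD l 2 ' '
    let parts := PySem.Chars.splitOn l [c]
    let k := (PySem.Chars.splitOn (PySem.List.slice l none (some 2)) [c]).length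
    String.ofList (PySem.Chars.join ['#'] (PySem.List.slice parts none (some (k : Int))) ++ [c] ++
      PySem.Chars.join ['#'] (PySem.List.slice parts (some (k : Int)) none))

-- ===== PRECONDITION & SPEC =====
def Spec_new_word (s : String) (out : String) : Prop := out = new_word_alt s
instance (s : String) (out : String) : Decidable (Spec_new_word s out) := by unfold Spec_new_word; infer_instance

-- ===== CLAIM (what is proved, stated in full; the proofs are below) =====
def Claim_equal_new_word : Prop := ∀ (s : String), Dom_new_word s → Spec_new_word s (new_word s)

-- ===== LEMMAS AND PROOFS =====

-- PySem's fuel-based splitOn with a single-char separator is Mathlib's List.splitOn.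
theorem pySplitOn_go_eq (c : Char) (fuel : Nat) (l cur : List Char) (acc : List (List Char))
    (h : l.length ≤ fuel) :
    PySem.Chars.splitOn.go [c] fuel l cur acc =
      acc.reverse ++ (List.splitOn c l).modifyHead (cur.reverse ++ ·) := by
  induction fuel generalizing l cur acc with
  | zero =>
    have : l = [] := by cases l <;> simp_all
    subst this
    simp [PySem.Chars.splitOn.go, List.splitOn_nil]
  | succ fuel ih =>
    cases l with
    | nil => simp [PySem.Chars.splitOn.go, List.splitOn_nil]
    | cons x rest =>
      have hle : rest.length ≤ fuel := by simpa using h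
      by_cases hx : x = c
      · subst hx
        have hpref : List.isPrefixOf [x] (x :: rest) = true := by
          simp [List.isPrefixOf]
        simp only [PySem.Chars.splitOn.go, hpref, if_true, List.length_nil,
          List.length_cons, List.drop_succ_cons, List.drop_zero]
        rw [ih rest [] (cur.reverse :: acc) hle]
        simp only [List.splitOn, List.splitOnP_cons, beq_self_eq_true, if_true]
        rw [show (fun (x : List Char) => [].reverse ++ x) = id by funext x; simp, List.modifyHead_id]
        simp
      · have hpref : List.isPrefixOf [x] (x :: rest) = true := by
          simp [List.isPrefixOf]
        simp only [PySem.Chars.splitOn.go]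
        have hne : ([c].isPrefixOf (x :: rest)) = false := by
          simp [List.isPrefixOf, Ne.symm hx]
        simp only [hne, Bool.false_eq_true, if_false]
        rw [ih rest (x :: cur) acc hle]
        have : (x == c) = false := by simp [hx]
        simp only [List.splitOn, List.splitOnP_cons, this, Bool.false_eq_true, if_false]
        rw [List.modifyHead_modifyHead]
        congr 1
        congr 1
        funext t
        simp

theorem pySplitOn_eq (c : Char) (l : List Char) :
    PySem.Chars.splitOn l [c] = List.splitOn c l := by
  have h := pySplitOn_go_eq c (l.length + 1) l [] []
  simp only [PySem.Chars.splitOn]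
  rw [h (by omega)]
  cases hs : List.splitOn c l with
  | nil => exact absurd hs (List.splitOnP_ne_nil _ _)
  | cons a t => simp

theorem intercalate_cons_cons (a b : List Char) (t : List (List Char)) :
    List.intercalate ['#'] (a :: b :: t) = a ++ '#' :: List.intercalate ['#'] (b :: t) := by
  simp [List.intercalate, List.intersperse]

-- Rejoining the segments with '#' is exactly "replace every c by '#'".
theorem intercalate_splitOn_eq_map (c : Char) (u : List Char) :
    List.intercalate ['#'] (List.splitOn c u) =
      u.map (fun ch => if ch == c then '#' else ch) := by
  induction u with
  | nil => simp [List.splitOn_nil, List.intercalate]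
  | cons x u ih =>
    by_cases hx : x = c
    · subst hx
      simp only [List.splitOn, List.splitOnP_cons, beq_self_eq_true, if_true]
      cases hs : List.splitOnP (fun y => y == x) u with
      | nil => exact absurd hs (List.splitOnP_ne_nil _ _)
      | cons a t =>
        simp only [List.map_cons, beq_self_eq_true, if_true]
        rw [← ih]
        simp [List.splitOn, hs, intercalate_cons_cons]
    · have hb : (x == c) = false := by simp [hx]
      simp only [List.splitOn, List.splitOnP_cons, hb, if_false]
      cases hs : List.splitOnP (fun y => y == c) u with
      | nil => exact absurd hs (List.splitOnP_ne_nil _ _)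
      | cons a t =>
        simp only [List.modifyHead, List.map_cons, hb, if_false]
        rw [← ih]
        simp only [List.splitOn, hs]
        cases t <;> simp [intercalate_cons_cons, List.intercalate]

-- Splitting across an explicit separator occurrence splits the segment lists.
theorem splitOn_append_sep (c : Char) (u v : List Char) :
    List.splitOn c (u ++ c :: v) = List.splitOn c u ++ List.splitOn c v := by
  induction u with
  | nil => simp [List.splitOn, List.splitOnP_cons, List.splitOn_nil]
  | cons x u ih =>
    by_cases hx : x = c
    · subst hx
      simp [List.splitOn, List.splitOnP_cons] at ih ⊢
      exact ih
    · have hb : (x == c) = false := by simp [hx]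
      simp only [List.cons_append, List.splitOn, List.splitOnP_cons, hb, if_false] at ih ⊢
      rw [ih]
      cases hs : List.splitOnP (fun y => y == c) u with
      | nil => exact absurd hs (List.splitOnP_ne_nil _ _)
      | cons a t => simp

theorem new_word_eq_alt (s : String) : new_word s = new_word_alt s := by
  unfold new_word new_word_alt
  by_cases h : s.toList.length < 3
  · have h' : s.length < 3 := by simpa using h
    simp [h']
  · simp only [h, if_false]
    set l := s.toList with hl
    have h3 : 2 < l.length := by omega
    set c := PySem.List.pyGetD l 2 ' ' with hc
    have hcget : c = l[2] := by
      simp [hc, PySem.List.pyGetD, PySem.List.pyGet?, PySem.List.pyIdx?, h3,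
        List.getElem?_eq_getElem h3]
    set u := l.take 2 with hu
    set v := l.drop 3 with hv
    have hul : u.length = 2 := by simp [hu]; omega
    have hsplit : l = u ++ c :: v := by
      rw [hu, hv, hcget]
      conv_lhs => rw [← List.take_append_drop 2 l]
      congr 1
      exact List.drop_eq_getElem_cons h3
    set r := fun ch => if ch == c then '#' else ch with hr
    have hmap : l.map r = u.map r ++ '#' :: v.map r := by
      rw [hsplit]
      simp [hr]
    -- A's side
    rw [PySem.List.foldl_append_singleton_eq_map]
    have hA1 : PySem.List.slice ([] ++ l.map r) (some 0) (some 2) = u.map r := by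
      rw [PySem.List.slice_toNat _ (by norm_num) (by norm_num)]
      rw [hmap]
      simp only [List.nil_append]
      norm_num
      exact List.take_left' (by simp [hul])
    have hA2 : PySem.List.slice ([] ++ l.map r) (some 3) none = v.map r := by
      rw [PySem.List.slice_from _ (by norm_num)]
      rw [hmap]
      have : u.map r ++ '#' :: v.map r = (u.map r ++ ['#']) ++ v.map r := by simp
      simp only [List.nil_append]
      rw [this]
      exact List.drop_left' (by simp [hul])
    rw [hA1, hA2]
    -- B's side
    have hls : PySem.List.slice l none (some 2) = u := by
      rw [PySem.List.slice_to _ (by norm_num)]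
      simp [hu]
    rw [hls, pySplitOn_eq, pySplitOn_eq]
    have hparts : List.splitOn c l = List.splitOn c u ++ List.splitOn c v := by
      rw [hsplit]; exact splitOn_append_sep c u v
    have hB1 : PySem.List.slice (List.splitOn c l) none
        (some ((List.splitOn c u).length : Int)) = List.splitOn c u := by
      rw [PySem.List.slice_to _ (by positivity)]
      rw [hparts, Int.toNat_natCast]
      exact List.take_left' rfl
    have hB2 : PySem.List.slice (List.splitOn c l)
        (some ((List.splitOn c u).length : Int)) none = List.splitOn c v := by
      rw [PySem.List.slice_from _ (by positivity)]
      rw [hparts, Int.toNat_natCast]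
      exact List.drop_left' rfl
    rw [hB1, hB2]
    simp only [PySem.Chars.join]
    rw [intercalate_splitOn_eq_map, intercalate_splitOn_eq_map]

-- ===== VERDICT (by name: the statement is the Claim_ definition above) =====
theorem new_word_spec : Claim_equal_new_word := by
  intro s _
  unfold Spec_new_word
  exact new_word_eq_alt s
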